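-- pv_equiv track=rewrite | github.com/In-Network-Machine-Learning/DINC | src/topologies/Fat-Tree/network_topology.py | generate_device_list
-- ===== SOURCE A (Python) =====
-- def generate_device_list(D, n_depth, n_branch, current_depth, depth_idx, total_idx):
--     if current_depth >= n_depth:
--         return D, depth_idx, total_idx
--     else:
--         if current_depth == 0:
--             D[total_idx] = [int(current_depth), int(depth_idx[current_depth])]
--             total_idx += 1
--             depth_idx[current_depth] += 1
--             current_depth += 1
--             D, depth_idx, total_idx = generate_device_list(D, n_depth, n_branch, current_depth, depth_idx, total_idx)
--         else:
--             for n in range(n_branch):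
--                 D[total_idx] = [int(current_depth), int(depth_idx[current_depth])]
--                 total_idx += 1
--                 depth_idx[current_depth] += 1
--                 current_depth += 1
--                 D, depth_idx, total_idx = generate_device_list(D, n_depth, n_branch, current_depth, depth_idx,
--                                                                total_idx)
--                 current_depth -= 1
--         return D, depth_idx, total_idx
-- ===== SOURCE B (Python) =====
-- # Iterative re-implementation: explicit LIFO stack of depths replaces the recursion.
-- # Like A, mutates D and depth_idx in place.
-- def generate_device_list(D, n_depth, n_branch, current_depth, depth_idx, total_idx):
--     if current_depth >= n_depth:
--         return D, depth_idx, total_idx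
--     stack = [current_depth] if current_depth == 0 else [current_depth] * n_branch
--     while stack:
--         depth = stack.pop()
--         D[total_idx] = [int(depth), int(depth_idx[depth])]
--         total_idx += 1
--         depth_idx[depth] += 1
--         if depth + 1 < n_depth:
--             stack.extend([depth + 1] * n_branch)
--     return D, depth_idx, total_idx
-- ===== Notes on version B (the rewrite author's own statement) =====
-- stated objective: alternative
-- what changed: The pre-order DFS recursion (with a per-node for-loop re-entering itself) is replaced by a single iterative loop over an explicit LIFO stack of depths.
import Mathlib
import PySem

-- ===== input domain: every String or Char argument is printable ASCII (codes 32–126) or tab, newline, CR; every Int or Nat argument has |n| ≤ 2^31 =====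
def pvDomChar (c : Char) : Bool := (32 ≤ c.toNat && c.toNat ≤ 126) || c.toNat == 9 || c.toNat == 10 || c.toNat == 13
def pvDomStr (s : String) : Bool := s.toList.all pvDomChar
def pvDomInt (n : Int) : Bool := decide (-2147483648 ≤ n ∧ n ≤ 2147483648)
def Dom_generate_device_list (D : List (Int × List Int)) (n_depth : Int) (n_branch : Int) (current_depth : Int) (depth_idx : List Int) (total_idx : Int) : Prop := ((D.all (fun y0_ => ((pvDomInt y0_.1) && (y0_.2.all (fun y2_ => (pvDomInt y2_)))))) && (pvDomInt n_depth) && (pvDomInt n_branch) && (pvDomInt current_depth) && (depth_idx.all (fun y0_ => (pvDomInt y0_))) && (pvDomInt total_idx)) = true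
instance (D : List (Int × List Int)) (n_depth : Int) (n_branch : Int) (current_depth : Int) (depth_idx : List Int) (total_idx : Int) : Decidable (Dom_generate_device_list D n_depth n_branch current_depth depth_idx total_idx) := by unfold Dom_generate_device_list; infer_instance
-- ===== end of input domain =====

-- ===== PORT A =====
-- B replaces A's pre-order DFS recursion by one iterative loop over an explicit LIFO stack of depths
-- (objective: alternative decomposition, same cost); like the Pythons, the equivalence is about the
-- returned triple (both Pythons mutate D and depth_idx in place in the same way).
-- D[total_idx] = v  (Python dict assignment on the association list; used by both ports)
def pvDictSet (D : List (Int × List Int)) (k : Int) (v : List Int) : List (Int × List Int) :=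
  (PySem.Dict.insert (PySem.Dict.mk D) k v).items

-- A's recursion, fuel-guarded for totality: each recursive call raises current_depth by 1, so the
-- entry fuel (n_depth - current_depth).toNat + 1 never runs out (the fuel-0 arm is unreachable).
def pv_gdl_go (n_depth : Int) (n_branch : Int) : Nat → Int → List (Int × List Int) → List Int → Int → (List (Int × List Int)) × List Int × Int
  | 0, _, D, depth_idx, total_idx => (D, depth_idx, total_idx)
  | Nat.succ fuel, current_depth, D, depth_idx, total_idx =>
    if current_depth ≥ n_depth then (D, depth_idx, total_idx)
    else if current_depth = 0 then
      -- D[total_idx] = [int(current_depth), int(depth_idx[current_depth])]; total_idx += 1; depth_idx[current_depth] += 1; recurse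
      let D1 := pvDictSet D total_idx [current_depth, PySem.List.pyGetD depth_idx current_depth 0]
      let di1 := PySem.List.pySetD depth_idx current_depth (PySem.List.pyGetD depth_idx current_depth 0 + 1)
      pv_gdl_go n_depth n_branch fuel (current_depth + 1) D1 di1 (total_idx + 1)
    else
      -- for n in range(n_branch): write the device, recurse one level deeper, come back
      (List.range n_branch.toNat).foldl (fun s _ =>
        let D1 := pvDictSet s.1 s.2.2 [current_depth, PySem.List.pyGetD s.2.1 current_depth 0]
        let di1 := PySem.List.pySetD s.2.1 current_depth (PySem.List.pyGetD s.2.1 current_depth 0 + 1)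
        pv_gdl_go n_depth n_branch fuel (current_depth + 1) D1 di1 (s.2.2 + 1)) (D, depth_idx, total_idx)

def generate_device_list (D : List (Int × List Int)) (n_depth : Int) (n_branch : Int) (current_depth : Int) (depth_idx : List Int) (total_idx : Int) : (List (Int × List Int)) × List Int × Int :=
  pv_gdl_go n_depth n_branch ((n_depth - current_depth).toNat + 1) current_depth D depth_idx total_idx

-- ===== PORT B =====
-- fuel bound for the stack loop: number of devices a frame (n_depth - d).toNat levels above the leaves yields
def pvWeightN (n_branch : Int) : Nat → Nat
  | 0 => 1
  | Nat.succ m => if n_branch.toNat = 0 then 1 else 1 + n_branch.toNat * pvWeightN n_branch m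

def pvFuel (n_depth : Int) (n_branch : Int) (stack : List Int) : Nat :=
  (stack.map (fun d => pvWeightN n_branch (n_depth - d).toNat)).sum

-- while stack: depth = stack.pop(); write the device; push the n_branch children if they are above n_depth
-- (fuel-guarded for totality: pvFuel strictly decreases per pop, so the fuel-0 arm is unreachable)
def pv_alt_go (n_depth : Int) (n_branch : Int) : Nat → List Int → List (Int × List Int) → List Int → Int → (List (Int × List Int)) × List Int × Int
  | 0, _, D, depth_idx, total_idx => (D, depth_idx, total_idx)
  | Nat.succ _, [], D, depth_idx, total_idx => (D, depth_idx, total_idx)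
  | Nat.succ fuel, depth :: st, D, depth_idx, total_idx =>
    let D1 := pvDictSet D total_idx [depth, PySem.List.pyGetD depth_idx depth 0]
    let di1 := PySem.List.pySetD depth_idx depth (PySem.List.pyGetD depth_idx depth 0 + 1)
    pv_alt_go n_depth n_branch fuel
      (if depth + 1 < n_depth then List.replicate n_branch.toNat (depth + 1) ++ st else st)
      D1 di1 (total_idx + 1)

def generate_device_list_alt (D : List (Int × List Int)) (n_depth : Int) (n_branch : Int) (current_depth : Int) (depth_idx : List Int) (total_idx : Int) : (List (Int × List Int)) × List Int × Int :=
  if current_depth ≥ n_depth then (D, depth_idx, total_idx)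
  else
    let stack := if current_depth = 0 then [current_depth] else List.replicate n_branch.toNat current_depth
    pv_alt_go n_depth n_branch (pvFuel n_depth n_branch stack) stack D depth_idx total_idx

-- ===== PRECONDITION & SPEC =====
-- Pre_ excludes (a) inputs on which indexing depth_idx[d] during the walk raises IndexError, and
-- (b) negative current_depth below n_depth with n_branch >= 1 — outside the natural depth domain, where
-- Python's negative indexing wraps and A's depth==0 entry special-case re-fires when the recursion climbs
-- back up to depth 0, an accident of A's structure that B (which treats a reached depth 0 uniformly) does
-- not reproduce.
def Pre_generate_device_list (D : List (Int × List Int)) (n_depth : Int) (n_branch : Int) (current_depth : Int) (depth_idx : List Int) (total_idx : Int) : Prop :=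
  current_depth < n_depth →
    (if 1 ≤ n_branch then (0 ≤ current_depth ∧ n_depth ≤ (depth_idx.length : Int))
     else (current_depth = 0 → depth_idx ≠ []))
instance (D : List (Int × List Int)) (n_depth : Int) (n_branch : Int) (current_depth : Int) (depth_idx : List Int) (total_idx : Int) : Decidable (Pre_generate_device_list D n_depth n_branch current_depth depth_idx total_idx) := by unfold Pre_generate_device_list; infer_instance

def pvWitness_generate_device_list : (List (Int × List Int)) × Int × Int × Int × List Int × Int := ([], 2, 2, 0, [0, 0], 0)

def Spec_generate_device_list (D : List (Int × List Int)) (n_depth : Int) (n_branch : Int) (current_depth : Int) (depth_idx : List Int) (total_idx : Int) (out : (List (Int × List Int)) × List Int × Int) : Prop := out = generate_device_list_alt D n_depth n_branch current_depth depth_idx total_idx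
instance (D : List (Int × List Int)) (n_depth : Int) (n_branch : Int) (current_depth : Int) (depth_idx : List Int) (total_idx : Int) (out : (List (Int × List Int)) × List Int × Int) : Decidable (Spec_generate_device_list D n_depth n_branch current_depth depth_idx total_idx out) := by unfold Spec_generate_device_list; infer_instance

-- ===== CLAIM (what is proved, stated in full; the proofs are below) =====
def Claim_equal_generate_device_list : Prop := ∀ (D : List (Int × List Int)) (n_depth : Int) (n_branch : Int) (current_depth : Int) (depth_idx : List Int) (total_idx : Int), Dom_generate_device_list D n_depth n_branch current_depth depth_idx total_idx → Pre_generate_device_list D n_depth n_branch current_depth depth_idx total_idx → Spec_generate_device_list D n_depth n_branch current_depth depth_idx total_idx (generate_device_list D n_depth n_branch current_depth depth_idx total_idx)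

-- ===== LEMMAS AND PROOFS =====

-- the state threaded through both programs
def pvSt : Type := (List (Int × List Int)) × List Int × Int

-- one device written at depth d (the common loop body of both ports)
def pvStep (s : pvSt) (d : Int) : pvSt :=
  (pvDictSet s.1 s.2.2 [d, PySem.List.pyGetD s.2.1 d 0],
   PySem.List.pySetD s.2.1 d (PySem.List.pyGetD s.2.1 d 0 + 1),
   s.2.2 + 1)

-- effect of one whole subtree rooted at depth d, phrased through A's recursion
def pvF (n_depth n_branch d : Int) (s : pvSt) : pvSt :=
  if d < n_depth then
    generate_device_list (pvStep s d).1 n_depth n_branch (d + 1) (pvStep s d).2.1 (pvStep s d).2.2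
  else s

-- B's loop run with exactly the fuel generate_device_list_alt hands it
def pvRun (n_depth n_branch : Int) (stack : List Int) (D : List (Int × List Int)) (di : List Int) (ti : Int) : pvSt :=
  pv_alt_go n_depth n_branch (pvFuel n_depth n_branch stack) stack D di ti

theorem pvTripleEta (s : pvSt) : ((s.1, s.2.1, s.2.2) : pvSt) = s := rfl

theorem pvF_id {n_depth : Int} (n_branch : Int) {d : Int} (h : ¬ d < n_depth) (s : pvSt) :
    pvF n_depth n_branch d s = s := by rw [pvF, if_neg h]

theorem pvF_iterate_id {n_depth : Int} (n_branch : Int) {d : Int} (h : ¬ d < n_depth) (k : Nat) (s : pvSt) :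
    (pvF n_depth n_branch d)^[k] s = s := Function.iterate_fixed (pvF_id n_branch h s) k

theorem pvF_pos {n_depth : Int} (n_branch : Int) {d : Int} (h : d < n_depth) (D : List (Int × List Int)) (di : List Int) (ti : Int) :
    pvF n_depth n_branch d (D, di, ti) =
      generate_device_list (pvDictSet D ti [d, PySem.List.pyGetD di d 0]) n_depth n_branch (d + 1)
        (PySem.List.pySetD di d (PySem.List.pyGetD di d 0 + 1)) (ti + 1) := by
  rw [pvF, if_pos h]; rfl

-- fuel irrelevance for A's recursion
theorem pv_gdl_go_fuel (n_depth n_branch : Int) : ∀ (f1 : Nat) {f2 : Nat} {cd : Int}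
    {D : List (Int × List Int)} {di : List Int} {ti : Int},
    (n_depth - cd).toNat < f1 → (n_depth - cd).toNat < f2 →
    pv_gdl_go n_depth n_branch f1 cd D di ti = pv_gdl_go n_depth n_branch f2 cd D di ti := by
  intro f1
  induction f1 with
  | zero => intro f2 cd D di ti h1 _; omega
  | succ f1 ih =>
    intro f2 cd D di ti h1 h2
    match f2, h2 with
    | Nat.succ f2, h2 =>
      simp only [pv_gdl_go]
      by_cases hge : cd ≥ n_depth
      · rw [if_pos hge, if_pos hge]
      · rw [if_neg hge, if_neg hge]
        by_cases h0 : cd = 0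
        · rw [if_pos h0, if_pos h0]
          exact ih (by omega) (by omega)
        · rw [if_neg h0, if_neg h0]
          exact List.foldl_ext _ _ _ fun s x _ => ih (by omega) (by omega)

theorem pv_gdl_zero (n_depth n_branch : Int) (D : List (Int × List Int)) (di : List Int) (ti : Int) :
    generate_device_list D n_depth n_branch 0 di ti = pvF n_depth n_branch 0 (D, di, ti) := by
  rw [generate_device_list]
  simp only [pv_gdl_go]
  by_cases h : (0 : Int) ≥ n_depth
  · rw [if_pos h, pvF_id n_branch (by omega)]
  · rw [if_neg h, if_true, pvF_pos n_branch (by omega), generate_device_list]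
    exact pv_gdl_go_fuel n_depth n_branch _ (by omega) (by omega)

theorem pv_foldl_iterate {α β : Type} (l : List β) (f : α → α) (s : α) :
    l.foldl (fun s _ => f s) s = f^[l.length] s := by
  induction l generalizing s with
  | nil => rfl
  | cons x l ih => rw [List.foldl_cons, ih, List.length_cons, ← Function.iterate_succ_apply]

theorem pv_gdl_char (n_depth n_branch cd : Int) (h0 : cd ≠ 0)
    (D : List (Int × List Int)) (di : List Int) (ti : Int) :
    generate_device_list D n_depth n_branch cd di ti =
      if cd < n_depth then (pvF n_depth n_branch cd)^[n_branch.toNat] (D, di, ti) else (D, di, ti) := by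
  rw [generate_device_list]
  simp only [pv_gdl_go]
  by_cases h : cd ≥ n_depth
  · rw [if_pos h, if_neg (by omega)]
  · rw [if_neg h, if_neg h0, if_pos (by omega : cd < n_depth)]
    refine Eq.trans (List.foldl_ext _ (fun (s : pvSt) (_ : Nat) => pvF n_depth n_branch cd s) _ ?_) ?_
    · intro s x _
      dsimp only
      rw [show pvF n_depth n_branch cd s = pvF n_depth n_branch cd (s.1, s.2.1, s.2.2) from rfl,
        pvF_pos n_branch (by omega : cd < n_depth) s.1 s.2.1 s.2.2, generate_device_list]
      exact pv_gdl_go_fuel n_depth n_branch _ (by omega) (by omega)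
    · rw [pv_foldl_iterate, List.length_range]

theorem pvF_succ (n_depth n_branch : Int) {d : Int} (h0 : 0 ≤ d) (h : d < n_depth) (s : pvSt) :
    pvF n_depth n_branch d s = (pvF n_depth n_branch (d + 1))^[n_branch.toNat] (pvStep s d) := by
  rw [show pvF n_depth n_branch d s = pvF n_depth n_branch d (s.1, s.2.1, s.2.2) from rfl,
    pvF_pos n_branch h s.1 s.2.1 s.2.2,
    pv_gdl_char n_depth n_branch (d + 1) (by omega)]
  by_cases h1 : d + 1 < n_depth
  · rw [if_pos h1]; rfl
  · rw [if_neg h1, pvF_iterate_id n_branch h1]; rfl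

-- weight/fuel facts for B's loop
theorem pvWeightN_pos (n_branch : Int) (m : Nat) : 1 ≤ pvWeightN n_branch m := by
  cases m with
  | zero => simp [pvWeightN]
  | succ m => rw [pvWeightN]; split <;> omega

theorem pvFuel_cons (n_depth n_branch d : Int) (st : List Int) :
    pvFuel n_depth n_branch (d :: st) = pvWeightN n_branch (n_depth - d).toNat + pvFuel n_depth n_branch st := by
  simp [pvFuel]

theorem pvFuel_append_rep (n_depth n_branch a : Int) (k : Nat) (st : List Int) :
    pvFuel n_depth n_branch (List.replicate k a ++ st) = k * pvWeightN n_branch (n_depth - a).toNat + pvFuel n_depth n_branch st := by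
  simp [pvFuel, List.map_replicate, List.sum_replicate, smul_eq_mul]

theorem pvFuel_step (n_depth n_branch d : Int) (st : List Int) :
    pvFuel n_depth n_branch (if d + 1 < n_depth then List.replicate n_branch.toNat (d + 1) ++ st else st) + 1
      ≤ pvFuel n_depth n_branch (d :: st) := by
  by_cases h : d + 1 < n_depth
  · rw [if_pos h, pvFuel_append_rep, pvFuel_cons,
      show (n_depth - d).toNat = (n_depth - (d + 1)).toNat + 1 from by omega, pvWeightN]
    by_cases hb : n_branch.toNat = 0
    · rw [if_pos hb, hb]; omega
    · rw [if_neg hb]; omega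
  · rw [if_neg h, pvFuel_cons]
    have := pvWeightN_pos n_branch (n_depth - d).toNat
    omega

-- fuel irrelevance for B's loop
theorem pv_alt_go_fuel (n_depth n_branch : Int) : ∀ (f1 : Nat) {f2 : Nat} {stack : List Int}
    {D : List (Int × List Int)} {di : List Int} {ti : Int},
    pvFuel n_depth n_branch stack ≤ f1 → pvFuel n_depth n_branch stack ≤ f2 →
    pv_alt_go n_depth n_branch f1 stack D di ti = pv_alt_go n_depth n_branch f2 stack D di ti := by
  intro f1
  induction f1 with
  | zero =>
    intro f2 stack D di ti h1 _
    match stack with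
    | [] => cases f2 <;> rfl
    | d :: st =>
      exfalso
      have := pvWeightN_pos n_branch (n_depth - d).toNat
      rw [pvFuel_cons] at h1
      omega
  | succ f1 ih =>
    intro f2 stack D di ti h1 h2
    match stack with
    | [] => cases f2 <;> rfl
    | d :: st =>
      have hpos := pvWeightN_pos n_branch (n_depth - d).toNat
      have hc := pvFuel_cons n_depth n_branch d st
      cases f2 with
      | zero => exact absurd h2 (by omega)
      | succ f2 =>
        simp only [pv_alt_go]
        have hstep := pvFuel_step n_depth n_branch d st
        exact ih (by omega) (by omega)

theorem pv_run_nil (n_depth n_branch : Int) (D : List (Int × List Int)) (di : List Int) (ti : Int) :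
    pvRun n_depth n_branch [] D di ti = (D, di, ti) := rfl

theorem pv_run_cons (n_depth n_branch d : Int) (st : List Int)
    (D : List (Int × List Int)) (di : List Int) (ti : Int) :
    pvRun n_depth n_branch (d :: st) D di ti =
      pvRun n_depth n_branch (if d + 1 < n_depth then List.replicate n_branch.toNat (d + 1) ++ st else st)
        (pvStep (D, di, ti) d).1 (pvStep (D, di, ti) d).2.1 (pvStep (D, di, ti) d).2.2 := by
  have hpos := pvWeightN_pos n_branch (n_depth - d).toNat
  have hc := pvFuel_cons n_depth n_branch d st
  have hstep := pvFuel_step n_depth n_branch d st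
  obtain ⟨f, hf⟩ : ∃ f, pvFuel n_depth n_branch (d :: st) = f + 1 :=
    ⟨pvFuel n_depth n_branch (d :: st) - 1, by omega⟩
  rw [pvRun, hf]
  simp only [pv_alt_go]
  exact pv_alt_go_fuel n_depth n_branch f (by omega) (le_refl _)

theorem pv_rep_frames (n_depth n_branch d : Int)
    (Hf : ∀ (st : List Int) (D : List (Int × List Int)) (di : List Int) (ti : Int),
      pvRun n_depth n_branch (d :: st) D di ti =
        pvRun n_depth n_branch st (pvF n_depth n_branch d (D, di, ti)).1
          (pvF n_depth n_branch d (D, di, ti)).2.1 (pvF n_depth n_branch d (D, di, ti)).2.2)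
    (k : Nat) (st : List Int) (D : List (Int × List Int)) (di : List Int) (ti : Int) :
    pvRun n_depth n_branch (List.replicate k d ++ st) D di ti =
      pvRun n_depth n_branch st ((pvF n_depth n_branch d)^[k] (D, di, ti)).1
        ((pvF n_depth n_branch d)^[k] (D, di, ti)).2.1 ((pvF n_depth n_branch d)^[k] (D, di, ti)).2.2 := by
  induction k generalizing D di ti with
  | zero => simp only [List.replicate, List.nil_append, Function.iterate_zero_apply]
  | succ k ih =>
    rw [List.replicate_succ, List.cons_append, Hf,
      ih (pvF n_depth n_branch d (D, di, ti)).1 (pvF n_depth n_branch d (D, di, ti)).2.1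
        (pvF n_depth n_branch d (D, di, ti)).2.2,
      pvTripleEta, ← Function.iterate_succ_apply]

theorem pv_frame (n_depth n_branch : Int) (m : Nat) (d : Int)
    (hm : (n_depth - d).toNat ≤ m) (hd0 : 0 ≤ d) (hd : d < n_depth) (st : List Int)
    (D : List (Int × List Int)) (di : List Int) (ti : Int) :
    pvRun n_depth n_branch (d :: st) D di ti =
      pvRun n_depth n_branch st (pvF n_depth n_branch d (D, di, ti)).1
        (pvF n_depth n_branch d (D, di, ti)).2.1 (pvF n_depth n_branch d (D, di, ti)).2.2 := by
  induction m generalizing d st D di ti with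
  | zero => omega
  | succ m ih =>
    rw [pv_run_cons]
    by_cases h1 : d + 1 < n_depth
    · rw [if_pos h1,
        pv_rep_frames n_depth n_branch (d + 1)
          (fun st D di ti => ih (d + 1) (by omega) (by omega) h1 st D di ti) n_branch.toNat st,
        pvTripleEta, ← pvF_succ n_depth n_branch hd0 hd]
    · rw [if_neg h1, pvF_succ n_depth n_branch hd0 hd, pvF_iterate_id n_branch h1]

-- ===== VERDICT (by name: the statement is the Claim_ definition above) =====
theorem generate_device_list_spec : Claim_equal_generate_device_list := by
  intro D n_depth n_branch cd di ti _ hPre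
  show generate_device_list D n_depth n_branch cd di ti = generate_device_list_alt D n_depth n_branch cd di ti
  by_cases h : cd < n_depth
  · rw [generate_device_list_alt, if_neg (by omega : ¬ cd ≥ n_depth)]
    show generate_device_list D n_depth n_branch cd di ti
      = pvRun n_depth n_branch (if cd = 0 then [cd] else List.replicate n_branch.toNat cd) D di ti
    by_cases h0 : cd = 0
    · rw [if_pos h0]
      subst h0
      rw [pv_gdl_zero,
        pv_frame n_depth n_branch (n_depth - 0).toNat 0 (le_refl _) (le_refl _) h [] D di ti,
        pv_run_nil, pvTripleEta]
    · rw [if_neg h0, pv_gdl_char n_depth n_branch cd h0, if_pos h]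
      by_cases hb : 1 ≤ n_branch
      · have hp := hPre h
        rw [if_pos hb] at hp
        rw [show List.replicate n_branch.toNat cd = List.replicate n_branch.toNat cd ++ [] from (List.append_nil _).symm,
          pv_rep_frames n_depth n_branch cd
            (fun st D di ti => pv_frame n_depth n_branch (n_depth - cd).toNat cd (le_refl _) hp.1 h st D di ti)
            n_branch.toNat [],
          pv_run_nil, pvTripleEta]
      · rw [show n_branch.toNat = 0 from by omega]
        rfl
  · rw [generate_device_list_alt, if_pos (by omega : cd ≥ n_depth), generate_device_list]
    simp only [pv_gdl_go]
    rw [if_pos (by omega : cd ≥ n_depth)]
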